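-- pv_equiv track=rewrite | github.com/Lucessy/advent-of-code-2022 | PECL2/pecl2.py | DiccionarioCodigo
-- ===== SOURCE A (Python) =====
-- def DiccionarioCodigo(provincias):
--     diccionarioPro = {}
--     numero = '00'
--     i = 1
--     j = 0
--     for provincia in provincias:
--         if i > 9:
--             j += 1
--             i = 0
--             numero = str(j)+str(i)
--             diccionarioPro[provincia] = numero
--             i += 1
--
--         else:
--             numero = str(j)+str(i)
--             i += 1
--             diccionarioPro[provincia] = numero
--     return diccionarioPro
-- ===== SOURCE B (Python) =====
-- def DiccionarioCodigo(provincias):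
--     # Stage 1: precompute the code table "00","01",...,"(n//10)9" by two nested digit loops.
--     n = len(provincias)
--     codigos = []
--     for j in range(n // 10 + 1):
--         for i in range(10):
--             codigos.append(str(j) + str(i))
--     # Stage 2: pair provinces with codes starting at "01".
--     return dict(zip(provincias, codigos[1:n + 1]))
-- ===== Notes on version B (the rewrite author's own statement) =====
-- stated objective: alternative
-- what changed: Replaces A's online single-pass counter state machine (mutable i/j with a carry if/else, assigning while scanning) by two separate stages: first precompute the whole code table '00','01',... with two nested digit loops, then pair it with the provinces via zip into a dict.
import Mathlib
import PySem

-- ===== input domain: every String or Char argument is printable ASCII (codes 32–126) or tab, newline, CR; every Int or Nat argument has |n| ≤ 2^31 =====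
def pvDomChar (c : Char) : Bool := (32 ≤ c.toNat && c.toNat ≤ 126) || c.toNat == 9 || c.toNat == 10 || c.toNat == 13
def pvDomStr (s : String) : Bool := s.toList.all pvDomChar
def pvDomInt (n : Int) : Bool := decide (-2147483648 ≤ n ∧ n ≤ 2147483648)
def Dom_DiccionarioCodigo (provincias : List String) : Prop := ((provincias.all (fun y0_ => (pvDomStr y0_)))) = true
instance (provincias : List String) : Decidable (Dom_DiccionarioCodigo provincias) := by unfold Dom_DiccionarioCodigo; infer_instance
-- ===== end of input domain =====

-- B replaces A's online counter state machine (mutable i/j with a carry if/else, assigning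
-- while scanning) by two stages: precompute the code table with nested digit loops, then zip.


-- ===== PORT A =====
-- the for-loop of A, carrying the dict and the mutable counters i, j
def DCLoopA : List String → PySem.Dict String String → Int → Int → PySem.Dict String String
  | [], d, _, _ => d
  | provincia :: rest, d, i, j =>
    if i > 9 then
      -- j += 1; i = 0; numero = str(j)+str(i); d[provincia] = numero; i += 1
      DCLoopA rest (d.insert provincia (PySem.Int.toStr (j + 1) ++ PySem.Int.toStr 0)) 1 (j + 1)
    else
      -- numero = str(j)+str(i); i += 1; d[provincia] = numero
      DCLoopA rest (d.insert provincia (PySem.Int.toStr j ++ PySem.Int.toStr i)) (i + 1) j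

def DiccionarioCodigo (provincias : List String) : List (String × String) :=
  (DCLoopA provincias PySem.Dict.empty 1 0).items

-- ===== PORT B =====
-- Stage 1: codigos built by nested digit loops (for j in range(n//10+1): for i in range(10): append str(j)+str(i));
-- Stage 2: dict(zip(provincias, codigos[1:n+1])).
def DiccionarioCodigo_alt (provincias : List String) : List (String × String) :=
  let n := provincias.length
  let codigos := (PySem.List.pyRange 0 (PySem.Int.floordiv (n : Int) 10 + 1) 1).foldl
    (fun acc j => (PySem.List.pyRange 0 10 1).foldl
      (fun acc2 i => acc2 ++ [PySem.Int.toStr j ++ PySem.Int.toStr i]) acc) []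
  ((provincias.zip (PySem.List.slice codigos (some 1) (some ((n : Int) + 1)))).foldl
    (fun d p => d.insert p.1 p.2) PySem.Dict.empty).items

-- ===== PRECONDITION & SPEC =====
def Spec_DiccionarioCodigo (provincias : List String) (out : List (String × String)) : Prop := out = DiccionarioCodigo_alt provincias
instance (provincias : List String) (out : List (String × String)) : Decidable (Spec_DiccionarioCodigo provincias out) := by unfold Spec_DiccionarioCodigo; infer_instance

-- ===== CLAIM (what is proved, stated in full; the proofs are below) =====
def Claim_equal_DiccionarioCodigo : Prop := ∀ (provincias : List String), Dom_DiccionarioCodigo provincias → Spec_DiccionarioCodigo provincias (DiccionarioCodigo provincias)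

-- ===== LEMMAS AND PROOFS =====

-- the code of 1-based position m, as both programs produce it
def dcCode (m : Nat) : String :=
  PySem.Int.toStr ((m / 10 : Nat) : Int) ++ PySem.Int.toStr ((m % 10 : Nat) : Int)

-- B's stage-1 table for q outer iterations is the first 10*q codes
theorem dcCodes_eq (q : Nat) :
    (PySem.List.pyRange 0 ((q : Int)) 1).foldl
      (fun acc j => (PySem.List.pyRange 0 10 1).foldl
        (fun acc2 i => acc2 ++ [PySem.Int.toStr j ++ PySem.Int.toStr i]) acc) [] =
    (List.range (10 * q)).map dcCode := by
  induction q with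
  | zero => simp [PySem.List.pyRange_one_eq_nil]
  | succ q ih =>
    have hcast : ((q + 1 : Nat) : Int) = (q : Int) + 1 := by push_cast; ring
    rw [hcast, PySem.List.pyRange_one_succ_right (by positivity), List.foldl_append, ih]
    simp only [List.foldl_cons, List.foldl_nil,
      PySem.List.foldl_append_singleton_eq_map]
    have hblock : (PySem.List.pyRange 0 10 1).map
        (fun i => PySem.Int.toStr (q : Int) ++ PySem.Int.toStr i) =
        (List.range' (10 * q) 10).map dcCode := by
      rw [show (10 : Int) = ((10 : Nat) : Int) from rfl, PySem.List.pyRange_zero_nat,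
        List.map_map, List.range'_eq_map_range, List.map_map]
      refine List.map_congr_left ?_
      intro i hi
      have hi10 : i < 10 := List.mem_range.mp hi
      have h1 : (10 * q + i) / 10 = q := by omega
      have h2 : (10 * q + i) % 10 = i := by omega
      simp [dcCode, h1, h2]
    rw [hblock, ← List.map_append]
    have : List.range (10 * q) ++ List.range' (10 * q) 10 = List.range (10 * (q + 1)) := by
      rw [List.range_eq_range', List.range_eq_range']
      have := @List.range'_append 0 (10 * q) 10 1
      simpa [Nat.mul_add] using this
    rw [this]

-- A's counters before step k (0-based) are i = k%10+1, j = k/10; under that invariant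
-- A's loop inserts exactly the codes of 1-based positions k+1, k+2, …
theorem dcLoopA_eq (l : List String) : ∀ (d : PySem.Dict String String) (k : Nat),
    DCLoopA l d (((k % 10 : Nat) : Int) + 1) ((k / 10 : Nat) : Int) =
      (l.zip ((List.range' (k + 1) l.length).map dcCode)).foldl
        (fun d p => d.insert p.1 p.2) d := by
  induction l with
  | nil => intro d k; simp [DCLoopA]
  | cons p rest ih =>
    intro d k
    rw [List.length_cons, List.range'_succ, List.map_cons, List.zip_cons_cons, List.foldl_cons]
    by_cases h9 : k % 10 = 9
    · rw [DCLoopA, if_pos (by omega : ((k % 10 : Nat) : Int) + 1 > 9)]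
      have h1 : (k + 1) % 10 = 0 := by omega
      have h2 : (k + 1) / 10 = k / 10 + 1 := by omega
      have hcode : dcCode (k + 1) =
          PySem.Int.toStr (((k / 10 : Nat) : Int) + 1) ++ PySem.Int.toStr 0 := by
        simp [dcCode, h1, h2]
      have := ih (d.insert p (PySem.Int.toStr (((k / 10 : Nat) : Int) + 1) ++ PySem.Int.toStr 0)) (k + 1)
      rw [h1, h2] at this
      push_cast at this ⊢
      rw [hcode]
      simpa using this
    · rw [DCLoopA, if_neg (by omega : ¬ ((k % 10 : Nat) : Int) + 1 > 9)]
      have h1 : (k + 1) % 10 = k % 10 + 1 := by omega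
      have h2 : (k + 1) / 10 = k / 10 := by omega
      have hcode : dcCode (k + 1) =
          PySem.Int.toStr ((k / 10 : Nat) : Int) ++ PySem.Int.toStr (((k % 10 : Nat) : Int) + 1) := by
        simp [dcCode, h1, h2]
      have := ih (d.insert p (PySem.Int.toStr ((k / 10 : Nat) : Int) ++ PySem.Int.toStr (((k % 10 : Nat) : Int) + 1))) (k + 1)
      rw [h1, h2] at this
      push_cast at this ⊢
      rw [hcode]
      simpa using this

-- ===== VERDICT (by name: the statement is the Claim_ definition above) =====
theorem DiccionarioCodigo_spec : Claim_equal_DiccionarioCodigo := by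
  intro provincias _
  unfold Spec_DiccionarioCodigo DiccionarioCodigo DiccionarioCodigo_alt
  set n := provincias.length with hn
  dsimp only
  -- stage 1: the table is the first 10*(n/10+1) codes
  have hdiv : PySem.Int.floordiv (n : Int) 10 + 1 = ((n / 10 + 1 : Nat) : Int) := by
    rw [show (10 : Int) = ((10 : Nat) : Int) from rfl, PySem.Int.floordiv_natCast]
    push_cast; ring
  rw [hdiv, dcCodes_eq]
  -- stage 2: the slice [1:n+1] is the codes of positions 1..n
  have hN : n + 1 ≤ 10 * (n / 10 + 1) := by omega
  have hslice : PySem.List.slice ((List.range (10 * (n / 10 + 1))).map dcCode)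
      (some 1) (some ((n : Int) + 1)) = (List.range' 1 n).map dcCode := by
    rw [PySem.List.slice_toNat _ (by omega) (by omega)]
    have ht1 : ((n : Int) + 1).toNat = n + 1 := by omega
    have ht2 : (1 : Int).toNat = 1 := rfl
    rw [ht1, ht2, ← List.map_drop, ← List.map_take,
      List.range_eq_range', List.drop_range']
    simp only [Nat.zero_add, Nat.one_mul]
    rw [List.take_range'_of_length_ge (by omega)]
    simp
  rw [hslice]
  have := dcLoopA_eq provincias PySem.Dict.empty 0
  simp only [Nat.zero_add, hn] at this ⊢
  norm_num at this
  rw [this]
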